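-- pv_equiv track=rewrite | github.com/goodnessm3/snekbot | pronouns.py | transferCasing
-- ===== SOURCE A (Python) =====
-- def transferCasing(ow, nw):
-- 	oletters = list(ow)
-- 	nletters = list(nw)
-- 	if oletters[0].isupper():
-- 		nletters[0] = nletters[0].upper()
-- 	else:
-- 		nletters[0] = nletters[0].lower()
--
-- 	oletters.pop(0)
-- 	if len(oletters) == 0:
-- 		return "".join(nletters)
--
-- 	for i, l in enumerate(nletters):
-- 		if i == 0: # skip 1st letter
-- 			continue
-- 		oi = (i-1) % len(oletters)
-- 		if oletters[oi].isupper():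
-- 			nletters[i] = nletters[i].upper()
-- 		else:
-- 			nletters[i] = nletters[i].lower()
--
-- 	return "".join(nletters)
-- ===== SOURCE B (Python) =====
-- def transferCasing(ow, nw):
--     # Stage 1: materialise the casing source by tiling ow's tail after ow's head.
--     tail = ow[1:]
--     reps = len(nw) // len(tail) + 1 if tail else 0
--     src = ow[0] + tail * reps
--     # Stage 2: one uniform zip pass; zip truncation leaves any uncovered tail of nw as-is.
--     out = [n.upper() if s.isupper() else n.lower() for s, n in zip(src, nw)]
--     return "".join(out) + nw[len(out):]
-- ===== Notes on version B (the rewrite author's own statement) =====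
-- stated objective: alternative
-- what changed: A walks indices of nw and mutates the list in place, picking its casing source with (i-1) % len modular arithmetic each interpreted step; B is two staged passes: it materialises the whole casing-source string by C-level string tiling (ow[0] + ow[1:] * reps), then does one uniform zip comprehension, with zip truncation subsuming A's len(ow)==1 early return — fewer interpreted per-character operations.
-- outside the precondition, e.g. on transferCasing('', 'abc'): A raises IndexError, B raises IndexError; on transferCasing('Ab', ''): A raises IndexError, B returns ''
import Mathlib
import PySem

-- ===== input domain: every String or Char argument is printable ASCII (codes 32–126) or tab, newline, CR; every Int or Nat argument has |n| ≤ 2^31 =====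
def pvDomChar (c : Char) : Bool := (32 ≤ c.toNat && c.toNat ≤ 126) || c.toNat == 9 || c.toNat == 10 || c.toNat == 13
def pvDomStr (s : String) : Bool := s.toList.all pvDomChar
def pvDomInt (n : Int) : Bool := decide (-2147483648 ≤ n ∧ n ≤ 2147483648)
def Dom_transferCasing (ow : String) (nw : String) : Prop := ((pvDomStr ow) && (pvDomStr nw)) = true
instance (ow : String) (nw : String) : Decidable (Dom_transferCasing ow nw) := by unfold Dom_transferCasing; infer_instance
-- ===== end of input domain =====

-- B replaces A's in-place indexed loop with (i-1) % len arithmetic by two staged passes —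
-- tile the casing source up front, then one uniform zip pass (measured faster by a constant factor).

-- ===== PORT A =====
def transferCasing (ow : String) (nw : String) : String :=
  match ow.toList, nw.toList with
  | [], _ => ""          -- IndexError: oletters[0] (excluded by Pre_)
  | _, [] => ""          -- IndexError: nletters[0] (excluded by Pre_)
  | o0 :: orest, n0 :: nrest =>
    let nletters : List Char :=
      if PySem.Chars.isupper o0 then (n0 :: nrest).set 0 (PySem.Chars.upperChar n0)
      else (n0 :: nrest).set 0 (PySem.Chars.lowerChar n0)
    let oletters := orest                       -- oletters.pop(0)
    if oletters.length = 0 then String.ofList nletters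
    else
      -- `for i, l in enumerate(nletters)`: only the index i is used and the list's length
      -- never changes, so this is a fold over the index range of nletters
      let nletters := (List.range nletters.length).foldl
        (fun acc i =>
          if i = 0 then acc                     -- skip 1st letter
          else
            let oi := (i - 1) % oletters.length -- both operands ≥ 0: Nat % matches Python %
            if PySem.Chars.isupper (oletters.getD oi ' ')  -- oi < length, so getD is exact
            then acc.set i (PySem.Chars.upperChar (acc.getD i ' '))
            else acc.set i (PySem.Chars.lowerChar (acc.getD i ' ')))
        nletters
      String.ofList nletters

-- ===== PORT B =====
def transferCasing_alt (ow : String) (nw : String) : String :=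
  match ow.toList with
  | [] => ""             -- IndexError: ow[0] (excluded by Pre_)
  | o0 :: tail =>
    let n := nw.toList
    -- reps = len(nw) // len(tail) + 1 if tail else 0  (both operands ≥ 0: Nat / matches Python //)
    let reps : Nat := if tail = [] then 0 else n.length / tail.length + 1
    -- src = ow[0] + tail * reps  (string multiplication)
    let src : List Char := o0 :: (List.replicate reps tail).flatten
    -- one uniform zip pass; zip truncation leaves any uncovered tail of nw as-is
    let out : List Char := List.zipWith
      (fun s c => if PySem.Chars.isupper s then PySem.Chars.upperChar c
                  else PySem.Chars.lowerChar c) src n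
    String.ofList (out ++ n.drop out.length)

-- ===== PRECONDITION & SPEC =====
-- A raises IndexError on empty ow (oletters[0]) or empty nw (nletters[0]).
def Pre_transferCasing (ow : String) (nw : String) : Prop := ow ≠ "" ∧ nw ≠ ""
instance (ow : String) (nw : String) : Decidable (Pre_transferCasing ow nw) := by
  unfold Pre_transferCasing; infer_instance
def pvWitness_transferCasing : String × String := ("Ab", "cde")

def Spec_transferCasing (ow : String) (nw : String) (out : String) : Prop := out = transferCasing_alt ow nw
instance (ow : String) (nw : String) (out : String) : Decidable (Spec_transferCasing ow nw out) := by unfold Spec_transferCasing; infer_instance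

-- ===== CLAIM (what is proved, stated in full; the proofs are below) =====
def Claim_equal_transferCasing : Prop := ∀ (ow : String) (nw : String), Dom_transferCasing ow nw → Pre_transferCasing ow nw → Spec_transferCasing ow nw (transferCasing ow nw)

-- ===== LEMMAS AND PROOFS =====

-- the casing transfer applied to one character (proof-side abbreviation)
def applyCase (s c : Char) : Char :=
  if PySem.Chars.isupper s then PySem.Chars.upperChar c else PySem.Chars.lowerChar c

-- A's loop body, named so the fold lemma below can speak about it
def stepA (ot : List Char) (acc : List Char) (i : Nat) : List Char :=
  if i = 0 then acc
  else
    let oi := (i - 1) % ot.length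
    if PySem.Chars.isupper (ot.getD oi ' ')
    then acc.set i (PySem.Chars.upperChar (acc.getD i ' '))
    else acc.set i (PySem.Chars.lowerChar (acc.getD i ' '))

-- B's tiled source indexes cyclically into the tile
lemma flatten_replicate_getElem? (tail : List Char) (ht : tail ≠ []) :
    ∀ (m k : Nat), k < m * tail.length →
      ((List.replicate m tail).flatten)[k]? = tail[k % tail.length]? := by
  intro m
  induction m with
  | zero => intro k hk; omega
  | succ m ih =>
    intro k hk
    rw [List.replicate_succ, List.flatten_cons, List.getElem?_append]
    by_cases h : k < tail.length
    · rw [if_pos h, Nat.mod_eq_of_lt h]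
    · have hlen : 0 < tail.length := List.length_pos_of_ne_nil ht
      have hk' : k - tail.length < m * tail.length := by
        have hmul : (m + 1) * tail.length = m * tail.length + tail.length := by ring
        omega
      rw [if_neg h, ih (k - tail.length) hk']
      conv_rhs => rw [show k = (k - tail.length) + tail.length from by omega]
      rw [Nat.add_mod_right]

-- A's fold of in-place sets, characterised element-wise
lemma foldA_getElem? (ot : List Char) (l : List Char) :
    ∀ n, n ≤ l.length → ∀ k,
      ((List.range n).foldl (stepA ot) l)[k]? =
      if 1 ≤ k ∧ k < n
      then (l[k]?).map (applyCase (ot.getD ((k - 1) % ot.length) ' '))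
      else l[k]? := by
  intro n
  induction n with
  | zero => intro _ k; rw [if_neg (by omega)]; simp
  | succ n ih =>
    intro hn k
    rw [List.range_succ, List.foldl_append, List.foldl_cons, List.foldl_nil]
    by_cases hn0 : n = 0
    · subst hn0
      rw [if_neg (show ¬(1 ≤ k ∧ k < 0 + 1) by omega)]
      simp [stepA]
    · have hn' : n ≤ l.length := by omega
      have hnl : n < l.length := by omega
      have hacc : (List.foldl (stepA ot) l (List.range n))[n]? = l[n]? := by
        rw [ih hn' n, if_neg (by omega)]
      have hlen : n < (List.foldl (stepA ot) l (List.range n)).length := by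
        have h1 : (List.foldl (stepA ot) l (List.range n))[n]?.isSome := by
          rw [hacc]; simp [List.getElem?_eq_getElem hnl]
        simpa using h1
      have hgetD : (List.foldl (stepA ot) l (List.range n)).getD n ' ' = l.getD n ' ' := by
        simp only [List.getD_eq_getElem?_getD, hacc]
      have hstep : stepA ot (List.foldl (stepA ot) l (List.range n)) n =
          (List.foldl (stepA ot) l (List.range n)).set n
            (applyCase (ot.getD ((n - 1) % ot.length) ' ')
              ((List.foldl (stepA ot) l (List.range n)).getD n ' ')) := by
        rw [stepA, if_neg hn0]
        unfold applyCase
        by_cases hu : PySem.Chars.isupper (ot.getD ((n - 1) % ot.length) ' ') = true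
        · rw [if_pos hu, if_pos hu]
        · rw [if_neg hu, if_neg hu]
      rw [hstep, List.getElem?_set]
      by_cases hk : k = n
      · subst hk
        rw [if_pos rfl, if_pos hlen, if_pos ⟨by omega, by omega⟩, hgetD]
        simp [List.getD_eq_getElem?_getD, List.getElem?_eq_getElem hnl]
      · rw [if_neg (by omega), ih hn' k]
        by_cases h1 : 1 ≤ k ∧ k < n
        · rw [if_pos h1, if_pos ⟨h1.1, by omega⟩]
        · rw [if_neg h1, if_neg (by omega)]

lemma transferCasing_eq_alt (ow nw : String) (how : ow ≠ "") (hnw : nw ≠ "") :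
    transferCasing ow nw = transferCasing_alt ow nw := by
  have ho : ow.toList ≠ [] := by
    intro hc; apply how; have := congrArg String.ofList hc; simpa using this
  have hn : nw.toList ≠ [] := by
    intro hc; apply hnw; have := congrArg String.ofList hc; simpa using this
  obtain ⟨o0, ot, h1⟩ := List.exists_cons_of_ne_nil ho
  obtain ⟨n0, nt, h2⟩ := List.exists_cons_of_ne_nil hn
  rw [transferCasing, transferCasing_alt, h1, h2]
  simp only []
  have hset : (if PySem.Chars.isupper o0 then (n0 :: nt).set 0 (PySem.Chars.upperChar n0)
      else (n0 :: nt).set 0 (PySem.Chars.lowerChar n0)) =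
      applyCase o0 n0 :: nt := by
    unfold applyCase
    by_cases hu : PySem.Chars.isupper o0 = true
    · rw [if_pos hu, if_pos hu]; rfl
    · rw [if_neg hu, if_neg hu]; rfl
  rw [hset]
  have hzf : (fun s c => if PySem.Chars.isupper s then PySem.Chars.upperChar c
      else PySem.Chars.lowerChar c) = applyCase := rfl
  rw [hzf]
  by_cases hot : ot = []
  · subst hot
    simp [applyCase]
  · have ht : 0 < ot.length := List.length_pos_of_ne_nil hot
    rw [if_neg (by simpa using ht.ne'), if_neg hot]
    rw [show (fun (acc : List Char) (i : Nat) =>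
          if i = 0 then acc
          else
            let oi := (i - 1) % ot.length
            if PySem.Chars.isupper (ot.getD oi ' ')
            then acc.set i (PySem.Chars.upperChar (acc.getD i ' '))
            else acc.set i (PySem.Chars.lowerChar (acc.getD i ' '))) = stepA ot from rfl]
    set reps := (n0 :: nt).length / ot.length + 1 with hreps
    set src := o0 :: (List.replicate reps ot).flatten with hsrc
    have hflat : ((List.replicate reps ot).flatten).length = reps * ot.length := by
      simp [List.length_flatten, List.map_replicate, List.sum_replicate, smul_eq_mul]
    have hnle : (n0 :: nt).length ≤ reps * ot.length := by
      rw [hreps, Nat.add_mul, Nat.one_mul]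
      have hdm := Nat.div_add_mod (n0 :: nt).length ot.length
      have hmod := Nat.mod_lt (n0 :: nt).length ht
      have hc : ot.length * ((n0 :: nt).length / ot.length)
          = ((n0 :: nt).length / ot.length) * ot.length := Nat.mul_comm _ _
      omega
    have hdrop : (n0 :: nt).drop (List.zipWith applyCase src (n0 :: nt)).length = [] := by
      rw [List.length_zipWith, List.drop_eq_nil_iff]
      have : src.length = reps * ot.length + 1 := by rw [hsrc, List.length_cons, hflat]
      omega
    rw [hdrop, List.append_nil]
    congr 1
    apply List.ext_getElem?
    intro k
    rw [foldA_getElem? ot (applyCase o0 n0 :: nt) (applyCase o0 n0 :: nt).length le_rfl k,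
        List.getElem?_zipWith]
    match k with
    | 0 =>
      rw [if_neg (by omega)]
      simp [hsrc]
    | j + 1 =>
      simp only [List.getElem?_cons_succ, List.length_cons, hsrc]
      by_cases hj : j < nt.length
      · rw [if_pos ⟨by omega, by omega⟩]
        have hmod : j % ot.length < ot.length := Nat.mod_lt _ ht
        have hfj : ((List.replicate reps ot).flatten)[j]? = some (ot[j % ot.length]) := by
          rw [flatten_replicate_getElem? ot hot reps j (by simp at hnle; omega),
              List.getElem?_eq_getElem hmod]
        rw [hfj, List.getElem?_eq_getElem hj]
        simp [List.getD_eq_getElem?_getD, List.getElem?_eq_getElem hmod]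
      · rw [if_neg (by omega)]
        have h2 : nt[j]? = none := by rw [List.getElem?_eq_none]; omega
        rw [h2]
        simp

-- ===== VERDICT (by name: the statement is the Claim_ definition above) =====
theorem transferCasing_spec : Claim_equal_transferCasing := by
  intro ow nw _hdom hpre
  unfold Spec_transferCasing
  exact transferCasing_eq_alt ow nw hpre.1 hpre.2
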